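-- pv_equiv track=rewrite | github.com/aaltulea/pyrefman | pyrefman/Utils.py | _is_balanced_bibtex_braces
-- ===== SOURCE A (Python) =====
-- def _is_balanced_bibtex_braces(text: str) -> bool:
--     depth = 0
--     for index, char in enumerate(text):
--         if char == "{" and (index == 0 or text[index - 1] != "\\"):
--             depth += 1
--         elif char == "}" and (index == 0 or text[index - 1] != "\\"):
--             depth -= 1
--             if depth < 0:
--                 return False
--     return depth == 0
-- ===== SOURCE B (Python) =====
-- def _is_balanced_bibtex_braces(text: str) -> bool:
--     # Phase 1: collect signed deltas for unescaped braces (prev-char test).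
--     deltas = []
--     prev = ''
--     for ch in text:
--         if ch == '{' and prev != '\\':
--             deltas.append(1)
--         elif ch == '}' and prev != '\\':
--             deltas.append(-1)
--         prev = ch
--     # Phase 2: running prefix sums; balanced iff none dips below 0 and total is 0.
--     sums = []
--     total = 0
--     for d in deltas:
--         total += d
--         sums.append(total)
--     return min(sums, default=0) >= 0 and total == 0
-- ===== Notes on version B (the rewrite author's own statement) =====
-- stated objective: alternative
-- what changed: Replaced the fused early-return depth scan with a two-phase build-then-reduce shape: first collect a list of signed deltas for unescaped braces (tracking the previous character instead of indexing text[i-1]), then compute the running prefix sums and decide balance as min(prefix sums) >= 0 and total == 0.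
import Mathlib
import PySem

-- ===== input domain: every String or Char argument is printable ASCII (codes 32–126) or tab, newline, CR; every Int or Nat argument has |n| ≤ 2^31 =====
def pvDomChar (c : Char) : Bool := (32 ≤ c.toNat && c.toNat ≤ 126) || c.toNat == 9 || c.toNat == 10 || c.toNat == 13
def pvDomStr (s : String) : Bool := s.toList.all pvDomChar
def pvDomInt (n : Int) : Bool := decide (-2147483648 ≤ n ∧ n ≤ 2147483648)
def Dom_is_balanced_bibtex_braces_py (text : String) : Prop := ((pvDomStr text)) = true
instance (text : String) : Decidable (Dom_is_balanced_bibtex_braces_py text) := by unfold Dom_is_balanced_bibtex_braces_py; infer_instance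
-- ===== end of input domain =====

-- B replaces A's fused early-return depth scan by a build-then-reduce shape (delta list,
-- then prefix sums, then min/total test); objective: alternative decomposition, same cost.

-- ===== PORT A =====
-- the 'for index, char in enumerate(text)' loop; 'return False' is the 'false' branch
def pvAGo (cs : List Char) : List (Int × Char) → Int → Bool
  | [], depth => depth == 0
  | (i, c) :: rest, depth =>
    if c == '{' && (i == 0 || PySem.List.pyGet? cs (i - 1) != some '\\') then
      pvAGo cs rest (depth + 1)
    else if c == '}' && (i == 0 || PySem.List.pyGet? cs (i - 1) != some '\\') then
      (if depth - 1 < 0 then false else pvAGo cs rest (depth - 1))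
    else
      pvAGo cs rest depth

def is_balanced_bibtex_braces_py (text : String) : Bool :=
  pvAGo text.toList (PySem.List.enumerate text.toList 0) 0

-- ===== PORT B =====
-- phase 1: the delta-building loop; prev = '' (no previous char) is ported as none
def pvBDeltas (prev : Option Char) : List Char → List Int
  | [] => []
  | c :: rest =>
    if c == '{' && prev != some '\\' then 1 :: pvBDeltas (some c) rest
    else if c == '}' && prev != some '\\' then (-1) :: pvBDeltas (some c) rest
    else pvBDeltas (some c) rest

-- phase 2: the prefix-sum loop building 'sums'
def pvBSums (total : Int) : List Int → List Int
  | [] => []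
  | d :: rest => (total + d) :: pvBSums (total + d) rest

-- min(sums, default=0)
def pvBMin : List Int → Int
  | [] => 0
  | s :: rest => rest.foldl min s

def is_balanced_bibtex_braces_py_alt (text : String) : Bool :=
  let deltas := pvBDeltas none text.toList
  let sums := pvBSums 0 deltas
  let total := deltas.foldl (· + ·) 0
  decide (0 ≤ pvBMin sums) && (total == 0)

-- ===== PRECONDITION & SPEC =====
def Spec_is_balanced_bibtex_braces_py (text : String) (out : Bool) : Prop := out = is_balanced_bibtex_braces_py_alt text
instance (text : String) (out : Bool) : Decidable (Spec_is_balanced_bibtex_braces_py text out) := by unfold Spec_is_balanced_bibtex_braces_py; infer_instance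

-- ===== CLAIM (what is proved, stated in full; the proofs are below) =====
def Claim_equal_is_balanced_bibtex_braces_py : Prop := ∀ (text : String), Dom_is_balanced_bibtex_braces_py text → Spec_is_balanced_bibtex_braces_py text (is_balanced_bibtex_braces_py text)

-- ===== LEMMAS AND PROOFS =====

-- reference scan: A's loop with the index lookup replaced by the previous character
def pvRef (prev : Option Char) : List Char → Int → Bool
  | [], depth => depth == 0
  | c :: rest, depth =>
    if c == '{' && prev != some '\\' then pvRef (some c) rest (depth + 1)
    else if c == '}' && prev != some '\\' then
      (if depth - 1 < 0 then false else pvRef (some c) rest (depth - 1))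
    else pvRef (some c) rest depth

theorem pvA_cond_eq (pre : List Char) (tail : List Char) :
    (((pre.length : Int) == 0) || PySem.List.pyGet? (pre ++ tail) ((pre.length : Int) - 1) != some '\\')
      = (pre.getLast? != some '\\') := by
  induction pre using List.reverseRecOn with
  | nil => simp
  | append_singleton pre' p _ =>
    have h : (((pre' ++ [p]).length : Int)) - 1 = ((pre'.length : Int)) := by
      simp
    rw [List.append_assoc, List.singleton_append, h, PySem.List.pyGet?_natCast]
    have h2 : (pre' ++ p :: tail)[pre'.length]? = some p := by
      rw [List.getElem?_append_right le_rfl]; simp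
    simp only [h2]
    simp
    intro hc
    omega

theorem pvAGo_eq_ref (rest pre : List Char) (depth : Int) :
    pvAGo (pre ++ rest) (PySem.List.enumerate rest (pre.length : Int)) depth
      = pvRef pre.getLast? rest depth := by
  induction rest generalizing pre depth with
  | nil => simp [pvAGo, pvRef, PySem.List.enumerate_nil]
  | cons c rest ih =>
    rw [PySem.List.enumerate_cons]
    have hlen : ((pre.length : Int)) + 1 = (((pre ++ [c]).length : Int)) := by simp
    have happ : pre ++ c :: rest = (pre ++ [c]) ++ rest := by simp
    have hlast : (pre ++ [c]).getLast? = some c := by simp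
    simp only [pvAGo, pvRef, pvA_cond_eq pre (c :: rest)]
    rw [hlen, happ]
    cases h1 : (c == '{' && pre.getLast? != some '\\') with
    | true =>
      simp only [if_pos]
      rw [ih (pre ++ [c]) (depth + 1), hlast]
    | false =>
      simp only [Bool.false_eq_true, if_neg, not_false_eq_true]
      cases h2 : (c == '}' && pre.getLast? != some '\\') with
      | true =>
        simp only [if_pos]
        by_cases h3 : depth - 1 < 0
        · simp [h3]
        · simp only [h3, if_neg, not_false_eq_true]
          rw [ih (pre ++ [c]) (depth - 1), hlast]
      | false =>
        simp only [Bool.false_eq_true, if_neg, not_false_eq_true]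
        rw [ih (pre ++ [c]) depth, hlast]

theorem pvRef_eq_sums (cs : List Char) (prev : Option Char) (depth : Int) (h : 0 ≤ depth) :
    pvRef prev cs depth
      = ((pvBSums depth (pvBDeltas prev cs)).all (fun s => decide (0 ≤ s))
          && (depth + (pvBDeltas prev cs).sum == 0)) := by
  induction cs generalizing prev depth with
  | nil => simp [pvRef, pvBDeltas, pvBSums]
  | cons c rest ih =>
    simp only [pvRef, pvBDeltas]
    cases h1 : (c == '{' && prev != some '\\') with
    | true =>
      simp only [if_pos]
      rw [ih (some c) (depth + 1) (by omega)]
      simp only [pvBSums, List.all_cons, List.sum_cons]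
      have hd : (decide (0 ≤ depth + 1)) = true := by simp; omega
      rw [hd]
      simp only [Bool.true_and]
      congr 1
      simp; omega
    | false =>
      simp only [Bool.false_eq_true, if_neg, not_false_eq_true]
      cases h2 : (c == '}' && prev != some '\\') with
      | true =>
        simp only [if_pos]
        simp only [pvBSums, List.all_cons, List.sum_cons]
        by_cases h3 : depth - 1 < 0
        · simp only [h3, if_pos]
          have hd : (decide (0 ≤ depth + -1)) = false := by simp; omega
          rw [hd]
          simp
        · simp only [h3, if_neg, not_false_eq_true]
          rw [ih (some c) (depth - 1) (by omega)]
          have hd : (decide (0 ≤ depth + -1)) = true := by simp; omega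
          rw [hd]
          simp only [Bool.true_and]
          have e1 : depth + -1 = depth - 1 := by ring
          rw [e1]
          congr 1
          simp; omega
      | false =>
        simp only [Bool.false_eq_true, if_neg, not_false_eq_true]
        exact ih (some c) depth h

theorem pvBMin_nonneg_iff (sums : List Int) :
    (0 ≤ pvBMin sums) ↔ sums.all (fun s => decide (0 ≤ s)) = true := by
  cases sums with
  | nil => simp [pvBMin]
  | cons s rest =>
    simp only [pvBMin, List.all_cons]
    induction rest generalizing s with
    | nil => simp
    | cons x rest ih =>
      simp only [List.foldl_cons, List.all_cons]
      rw [ih (min s x)]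
      simp [and_assoc]

theorem pvFoldl_add_eq_sum (ds : List Int) (a : Int) : ds.foldl (· + ·) a = a + ds.sum := by
  induction ds generalizing a with
  | nil => simp
  | cons d rest ih => simp only [List.foldl_cons, List.sum_cons]; rw [ih]; ring

-- ===== VERDICT (by name: the statement is the Claim_ definition above) =====
theorem is_balanced_bibtex_braces_py_spec : Claim_equal_is_balanced_bibtex_braces_py := by
  intro text _
  unfold Spec_is_balanced_bibtex_braces_py
  show is_balanced_bibtex_braces_py text = is_balanced_bibtex_braces_py_alt text
  show pvAGo text.toList (PySem.List.enumerate text.toList 0) 0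
      = (decide (0 ≤ pvBMin (pvBSums 0 (pvBDeltas none text.toList)))
          && ((pvBDeltas none text.toList).foldl (· + ·) 0 == 0))
  have hA := pvAGo_eq_ref text.toList [] 0
  simp only [List.nil_append, List.length_nil, Nat.cast_zero, List.getLast?_nil] at hA
  rw [hA, pvRef_eq_sums text.toList none 0 le_rfl]
  rw [pvFoldl_add_eq_sum]
  by_cases hall : ((pvBSums 0 (pvBDeltas none text.toList)).all (fun s => decide (0 ≤ s))) = true
  · rw [hall]
    have := (pvBMin_nonneg_iff (pvBSums 0 (pvBDeltas none text.toList))).mpr hall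
    simp [this]
  · simp only [Bool.not_eq_true] at hall
    rw [hall]
    have : ¬ (0 ≤ pvBMin (pvBSums 0 (pvBDeltas none text.toList))) := by
      rw [pvBMin_nonneg_iff]; simp [hall]
    simp [this]
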